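-- pv_equiv track=rewrite | github.com/Kanak0202/DSA | Graph/prereq.py | is_valid_course_order
-- ===== SOURCE A (Python) =====
-- def is_valid_course_order(num_courses, prerequisites, course_order):
--     completed_courses = set()
--
--     for course in course_order:
--         if course in prerequisites:
--             deps = prerequisites[course]
--             if not all(dep in completed_courses for dep in deps):
--                 return False
--
--         completed_courses.add(course)
--
--     return True
-- ===== SOURCE B (Python) =====
-- def is_valid_course_order(num_courses, prerequisites, course_order):
--     # Precompute the first-occurrence position of every course, then check each
--     # prerequisite edge against the position table (no running 'completed' set).
--     pos = {}
--     for i, c in enumerate(course_order):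
--         pos.setdefault(c, i)
--     for c in pos:
--         if c in prerequisites:
--             pc = pos[c]
--             for dep in prerequisites[c]:
--                 if dep not in pos or pos[dep] >= pc:
--                     return False
--     return True
-- ===== Notes on version B (the rewrite author's own statement) =====
-- stated objective: alternative
-- what changed: Replaces the running 'completed' set scanned during a single left-to-right pass with a precomputed first-occurrence position table, then validates each prerequisite edge by comparing positions.
import Mathlib
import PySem

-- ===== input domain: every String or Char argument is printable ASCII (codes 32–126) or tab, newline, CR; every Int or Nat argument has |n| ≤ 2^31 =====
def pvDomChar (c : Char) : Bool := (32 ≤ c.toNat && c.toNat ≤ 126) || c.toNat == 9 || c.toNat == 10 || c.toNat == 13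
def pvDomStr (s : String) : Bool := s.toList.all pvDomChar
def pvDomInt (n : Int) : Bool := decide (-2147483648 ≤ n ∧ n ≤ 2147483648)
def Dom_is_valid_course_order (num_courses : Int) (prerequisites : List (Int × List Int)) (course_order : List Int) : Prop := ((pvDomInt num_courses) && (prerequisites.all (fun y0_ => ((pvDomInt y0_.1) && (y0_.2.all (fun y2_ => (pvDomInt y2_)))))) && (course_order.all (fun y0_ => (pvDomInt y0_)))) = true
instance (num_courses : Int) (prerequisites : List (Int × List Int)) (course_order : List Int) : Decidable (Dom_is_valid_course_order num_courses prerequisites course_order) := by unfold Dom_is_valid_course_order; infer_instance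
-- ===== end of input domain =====

-- B replaces A's single pass with a running 'completed' set by a precomputed
-- first-occurrence position table plus an edge-check pass (return value proved equal).

-- ===== PORT A =====
-- A's loop: for course in course_order, check deps against the running completed set.
def pvGoA (prerequisites : List (Int × List Int)) : List Int → PySem.Set Int → Bool
  | [], _ => true
  | course :: rest, completed =>
    match prerequisites.lookup course with
    | some deps =>
        if deps.all (fun dep => PySem.Set.contains completed dep) then
          pvGoA prerequisites rest (PySem.Set.add completed course)
        else
          false
    | none => pvGoA prerequisites rest (PySem.Set.add completed course)

def is_valid_course_order (num_courses : Int) (prerequisites : List (Int × List Int)) (course_order : List Int) : Bool :=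
  pvGoA prerequisites course_order PySem.Set.empty

-- ===== PORT B =====
-- B's first loop: pos.setdefault(c, i) over enumerate(course_order).
def pvPos (course_order : List Int) : PySem.Dict Int Int :=
  (PySem.List.enumerate course_order).foldl
    (fun d ic => d.setdefault ic.2 ic.1) PySem.Dict.empty

def is_valid_course_order_alt (num_courses : Int) (prerequisites : List (Int × List Int)) (course_order : List Int) : Bool :=
  let pos := pvPos course_order
  pos.keys.all (fun c =>
    match prerequisites.lookup c with
    | some deps =>
        deps.all (fun dep =>
          match pos.get? dep, pos.get? c with
          | some pd, some pc => decide (pd < pc)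
          | _, _ => false)
    | none => true)

-- ===== PRECONDITION & SPEC =====
def Spec_is_valid_course_order (num_courses : Int) (prerequisites : List (Int × List Int)) (course_order : List Int) (out : Bool) : Prop := out = is_valid_course_order_alt num_courses prerequisites course_order
instance (num_courses : Int) (prerequisites : List (Int × List Int)) (course_order : List Int) (out : Bool) : Decidable (Spec_is_valid_course_order num_courses prerequisites course_order out) := by unfold Spec_is_valid_course_order; infer_instance

-- ===== CLAIM (what is proved, stated in full; the proofs are below) =====
def Claim_equal_is_valid_course_order : Prop := ∀ (num_courses : Int) (prerequisites : List (Int × List Int)) (course_order : List Int), Dom_is_valid_course_order num_courses prerequisites course_order → Spec_is_valid_course_order num_courses prerequisites course_order (is_valid_course_order num_courses prerequisites course_order)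

-- ===== LEMMAS AND PROOFS =====

-- index facts
lemma pv_idxOf_le_of_getElem (l : List Int) (a : Int) (j : Nat) (hj : j < l.length)
    (h : l[j] = a) : l.idxOf a ≤ j := by
  induction l generalizing j with
  | nil => simp at hj
  | cons x xs ih =>
    cases j with
    | zero => simp at h; simp [h]
    | succ j =>
      simp at h
      by_cases hx : x = a
      · simp [hx]
      · simp [hx]
        exact ih j (by simpa using hj) h

lemma pv_idxOf_lt_of_mem_take (l : List Int) (a : Int) (k : Nat)
    (h : a ∈ l.take k) : l.idxOf a < k := by
  induction l generalizing k with
  | nil => simp at h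
  | cons x xs ih =>
    cases k with
    | zero => simp at h
    | succ k =>
      simp at h
      by_cases hx : x = a
      · simp [hx]
      · rcases h with h | h
        · exact absurd h.symm hx
        · simp [hx]
          exact ih k h

-- characterization of B's position table
lemma pvPos_aux_get (order : List Int) (s : Int) (d : PySem.Dict Int Int) (c : Int) :
    ((PySem.List.enumerate order s).foldl (fun d ic => d.setdefault ic.2 ic.1) d).get? c
      = (match d.get? c with
         | some v => some v
         | none => if c ∈ order then some (s + (order.idxOf c : Int)) else none) := by
  induction order generalizing s d with
  | nil =>
    simp [PySem.List.enumerate_nil]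
    cases d.get? c <;> simp
  | cons x xs ih =>
    rw [PySem.List.enumerate_cons]
    simp only [List.foldl_cons]
    rw [ih]
    by_cases hx : c = x
    · subst hx
      rw [PySem.Dict.get?_setdefault_self d c s]
      cases hdc : d.get? c with
      | some v => simp
      | none => simp
    · rw [PySem.Dict.get?_setdefault_of_ne d s hx]
      cases hdc : d.get? c with
      | some v => simp
      | none =>
        have hxc : x ≠ c := fun h => hx h.symm
        simp only [List.mem_cons, List.idxOf_cons]
        by_cases hmem : c ∈ xs
        · have hbeq : (x == c) = false := beq_eq_false_iff_ne.mpr hxc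
          simp [hmem, hx, hbeq]
          ring
        · simp [hmem, hx]

lemma pvPos_get (order : List Int) (c : Int) :
    (pvPos order).get? c = if c ∈ order then some ((order.idxOf c : Int)) else none := by
  unfold pvPos
  rw [pvPos_aux_get]
  simp [PySem.Dict.get?_empty]

lemma pvPos_mem_keys (order : List Int) (c : Int) :
    c ∈ (pvPos order).keys ↔ c ∈ order := by
  rw [← PySem.Dict.contains_iff_mem_keys]
  rw [PySem.Dict.contains_eq_isSome_get?, pvPos_get]
  by_cases h : c ∈ order <;> simp [h]

-- the common specification S
def pvS (ps : List (Int × List Int)) (order : List Int) : Prop :=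
  ∀ c ∈ order, ∀ deps, ps.lookup c = some deps →
    ∀ d ∈ deps, d ∈ order ∧ order.idxOf d < order.idxOf c

-- A's loop ↔ decomposition condition
lemma pvGoA_iff (ps : List (Int × List Int)) (order : List Int) (seen : PySem.Set Int) :
    pvGoA ps order seen = true ↔
      ∀ l c r, order = l ++ c :: r → ∀ deps, ps.lookup c = some deps →
        ∀ d ∈ deps, d ∈ seen ∨ d ∈ l := by
  induction order generalizing seen with
  | nil =>
    constructor
    · intro _ l c r h
      exact absurd h (by simp)
    · intro _
      rfl
  | cons x xs ih =>
    constructor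
    · intro h l c r hdec deps hdeps d hd
      cases l with
      | nil =>
        simp at hdec
        obtain ⟨hx, _⟩ := hdec
        subst hx
        simp [pvGoA, hdeps] at h
        left
        exact h.1 d hd
      | cons y l' =>
        simp at hdec
        obtain ⟨hy, hxs⟩ := hdec
        subst hy
        -- h : pvGoA on (x :: xs); reduce to the tail call
        have htail : pvGoA ps xs (PySem.Set.add seen x) = true := by
          cases hpx : ps.lookup x with
          | none => simpa [pvGoA, hpx] using h
          | some dx =>
            simp [pvGoA, hpx] at h
            exact h.2
        have := (ih (PySem.Set.add seen x)).mp htail l' c r hxs deps hdeps d hd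
        rcases this with hs | hl
        · rcases (PySem.Set.mem_add seen x d).mp hs with h1 | h1
          · left; exact h1
          · right; simp [h1]
        · right; simp [hl]
    · intro h
      cases hpx : ps.lookup x with
      | none =>
        simp [pvGoA, hpx]
        apply (ih (PySem.Set.add seen x)).mpr
        intro l c r hdec deps hdeps d hd
        have := h (x :: l) c r (by simp [hdec]) deps hdeps d hd
        rcases this with h1 | h1
        · left; exact (PySem.Set.mem_add seen x d).mpr (Or.inl h1)
        · simp at h1
          rcases h1 with h1 | h1
          · left; exact (PySem.Set.mem_add seen x d).mpr (Or.inr h1)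
          · right; exact h1
      | some dx =>
        have hall : ∀ d ∈ dx, d ∈ seen := by
          intro d hd
          have := h [] x xs (by simp) dx hpx d hd
          rcases this with h1 | h1
          · exact h1
          · exact absurd h1 (by simp)
        simp only [pvGoA, hpx]
        rw [if_pos (by simpa [List.all_eq_true, PySem.Set.contains_iff] using hall)]
        apply (ih (PySem.Set.add seen x)).mpr
        intro l c r hdec deps hdeps d hd
        have := h (x :: l) c r (by simp [hdec]) deps hdeps d hd
        rcases this with h1 | h1
        · left; exact (PySem.Set.mem_add seen x d).mpr (Or.inl h1)
        · simp at h1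
          rcases h1 with h1 | h1
          · left; exact (PySem.Set.mem_add seen x d).mpr (Or.inr h1)
          · right; exact h1

-- A ↔ S
lemma pvA_iff_S (ps : List (Int × List Int)) (order : List Int) :
    is_valid_course_order 0 ps order = true ↔ pvS ps order := by
  unfold is_valid_course_order
  rw [pvGoA_iff]
  constructor
  · intro h c hc deps hdeps d hd
    have hlt := List.idxOf_lt_length_of_mem hc
    have hdec : order = order.take (order.idxOf c) ++ c :: order.drop (order.idxOf c + 1) := by
      conv_lhs => rw [← List.take_append_drop (order.idxOf c) order]
      rw [List.drop_eq_getElem_cons hlt, List.getElem_idxOf hlt]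
    have := h _ c _ hdec deps hdeps d hd
    rcases this with h1 | h1
    · exact absurd h1 (by simp [PySem.Set.empty])
    · exact ⟨List.mem_of_mem_take h1, pv_idxOf_lt_of_mem_take order d _ h1⟩
  · intro h l c r hdec deps hdeps d hd
    subst hdec
    right
    have hc : c ∈ l ++ c :: r := by simp
    obtain ⟨hdmem, hdlt⟩ := h c hc deps hdeps d hd
    have hcle : (l ++ c :: r).idxOf c ≤ l.length := by
      apply pv_idxOf_le_of_getElem _ c l.length (by simp)
      rw [List.getElem_append_right (Nat.le_refl l.length)]
      simp
    have hdl : (l ++ c :: r).idxOf d < l.length := Nat.lt_of_lt_of_le hdlt hcle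
    have hdlen := List.idxOf_lt_length_of_mem hdmem
    have hget : (l ++ c :: r)[(l ++ c :: r).idxOf d]'hdlen = d := List.getElem_idxOf hdlen
    rw [List.getElem_append_left hdl] at hget
    rw [← hget]
    exact List.getElem_mem _
  
-- B ↔ S
lemma pvB_iff_S (ps : List (Int × List Int)) (order : List Int) :
    is_valid_course_order_alt 0 ps order = true ↔ pvS ps order := by
  unfold is_valid_course_order_alt
  simp only [List.all_eq_true]
  constructor
  · intro h c hc deps hdeps d hd
    have hk := (pvPos_mem_keys order c).mpr hc
    have := h c hk
    rw [hdeps] at this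
    simp only [List.all_eq_true] at this
    have hd' := this d hd
    rw [pvPos_get, pvPos_get] at hd'
    by_cases hdm : d ∈ order
    · simp [hdm, hc] at hd'
      exact ⟨hdm, by exact_mod_cast hd'⟩
    · simp [hdm, hc] at hd'
  · intro h c hk
    have hc := (pvPos_mem_keys order c).mp hk
    cases hdeps : ps.lookup c with
    | none => simp
    | some deps =>
      simp only [List.all_eq_true]
      intro d hd
      obtain ⟨hdm, hlt⟩ := h c hc deps hdeps d hd
      rw [pvPos_get, pvPos_get]
      simp [hdm, hc]
      exact_mod_cast hlt

-- neither port reads num_courses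
lemma pvA_num (n : Int) (ps : List (Int × List Int)) (order : List Int) :
    is_valid_course_order n ps order = is_valid_course_order 0 ps order := rfl
lemma pvB_num (n : Int) (ps : List (Int × List Int)) (order : List Int) :
    is_valid_course_order_alt n ps order = is_valid_course_order_alt 0 ps order := rfl

-- ===== VERDICT (by name: the statement is the Claim_ definition above) =====
theorem is_valid_course_order_spec : Claim_equal_is_valid_course_order := by
  intro n ps order _
  unfold Spec_is_valid_course_order
  rw [pvA_num, pvB_num]
  by_cases h : pvS ps order
  · rw [(pvA_iff_S ps order).mpr h, ((pvB_iff_S ps order).mpr h)]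
  · have ha := (fun hh => h ((pvA_iff_S ps order).mp hh))
    have hb := (fun hh => h ((pvB_iff_S ps order).mp hh))
    rw [Bool.eq_false_iff.mpr ha, Bool.eq_false_iff.mpr hb]
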